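-- pv_equiv track=rewrite | github.com/kjkalliojarvi/Kelly | yhdistelma.py | tro_ok
-- ===== SOURCE A (Python) =====
-- def tro_ok(yhd, systeemi):
--     mini = systeemi[0][0]
--     laskuri = 0
--     oukkidoukki = False
--     for l in range(0, 3):
--         for m in range(0, len(systeemi[1])):
--             if yhd[l] == systeemi[1][m]:
--                 laskuri += 1
--         for n in range(0, len(systeemi[2])):
--             if yhd[l] == systeemi[2][n]:
--                 laskuri = -10
--     if laskuri >= mini:
--         oukkidoukki = True
--
--     return oukkidoukki
-- ===== SOURCE B (Python) =====
-- def tro_ok(yhd, systeemi):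
--     mini = systeemi[0][0]
--     values = yhd[:3]
--     if any(v in systeemi[2] for v in values):
--         laskuri = -10
--     else:
--         laskuri = sum(systeemi[1].count(v) for v in values)
--     return laskuri >= mini
-- ===== Notes on version B (the rewrite author's own statement) =====
-- stated objective: simpler
-- what changed: Replaces A's nested index loops (incremental counting with a -10 overwrite inside the loop) by a direct decomposition: one membership test over the three values against the forbidden list, and otherwise a single sum of list1 counts; Pre_ excludes only inputs where A raises IndexError (yhd or systeemi shorter than 3, or systeemi[0] empty).
-- intended difference: When one of the three values is on the forbidden list systeemi[2] but the threshold lies in (-10, -10 + list1 counts of values after the last hit], A returns True because list1 counts added after its -10 overwrite resurrect the counter, while B returns False; a hit on the forbidden list is clearly meant to disqualify the combination. — e.g. on tro_ok([1, 2, 3], [[-9], [3], [1]]): A returns true, B returns false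
import Mathlib
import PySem

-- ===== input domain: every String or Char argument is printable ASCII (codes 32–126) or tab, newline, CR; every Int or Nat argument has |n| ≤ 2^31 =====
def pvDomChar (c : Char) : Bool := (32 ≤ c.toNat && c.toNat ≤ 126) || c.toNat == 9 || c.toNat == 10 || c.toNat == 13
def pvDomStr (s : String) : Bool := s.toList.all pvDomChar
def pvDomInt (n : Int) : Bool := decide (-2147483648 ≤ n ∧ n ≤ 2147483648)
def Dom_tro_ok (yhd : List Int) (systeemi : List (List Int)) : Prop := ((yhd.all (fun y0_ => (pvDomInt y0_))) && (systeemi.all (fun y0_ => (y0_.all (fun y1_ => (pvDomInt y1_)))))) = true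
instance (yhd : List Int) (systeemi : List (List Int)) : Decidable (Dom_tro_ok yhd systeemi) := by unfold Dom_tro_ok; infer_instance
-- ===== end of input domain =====

-- B treats a hit on the forbidden list systeemi[2] as outright disqualification (counter = -10),
-- instead of A's nested index loops whose -10 overwrite can be partially undone afterwards.
-- ===== PORT A =====
def tro_ok (yhd : List Int) (systeemi : List (List Int)) : Bool :=
  let mini := PySem.List.pyGetD (PySem.List.pyGetD systeemi 0 []) 0 0
  let laskuri : Int :=
    (PySem.List.pyRange 0 3 1).foldl (fun lask l =>
      let lask :=
        (PySem.List.pyRange 0 ((PySem.List.pyGetD systeemi 1 []).length) 1).foldl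
          (fun a m =>
            if PySem.List.pyGetD yhd l 0 == PySem.List.pyGetD (PySem.List.pyGetD systeemi 1 []) m 0
            then a + 1 else a) lask
      (PySem.List.pyRange 0 ((PySem.List.pyGetD systeemi 2 []).length) 1).foldl
        (fun a n =>
          if PySem.List.pyGetD yhd l 0 == PySem.List.pyGetD (PySem.List.pyGetD systeemi 2 []) n 0
          then (-10 : Int) else a) lask) 0
  decide (laskuri ≥ mini)

-- ===== PORT B =====
def tro_ok_alt (yhd : List Int) (systeemi : List (List Int)) : Bool :=
  let mini := PySem.List.pyGetD (PySem.List.pyGetD systeemi 0 []) 0 0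
  let values := PySem.List.slice yhd none (some 3)
  let laskuri := if values.any (· ∈ PySem.List.pyGetD systeemi 2 []) then -10
    else (values.map (fun v => (PySem.List.count (PySem.List.pyGetD systeemi 1 []) v : Int))).sum
  decide (laskuri ≥ mini)

-- ===== PRECONDITION & SPEC =====
-- Pre_ excludes exactly the inputs on which Python A raises IndexError: yhd shorter than 3,
-- systeemi shorter than 3, or systeemi[0] empty.
def Pre_tro_ok (yhd : List Int) (systeemi : List (List Int)) : Prop :=
  3 ≤ yhd.length ∧ 3 ≤ systeemi.length ∧ systeemi.headD [] ≠ []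
instance (yhd : List Int) (systeemi : List (List Int)) : Decidable (Pre_tro_ok yhd systeemi) := by
  unfold Pre_tro_ok; infer_instance
def pvWitness_tro_ok : List Int × List (List Int) := ([1, 2, 3], [[2], [1, 2, 4], [5]])

-- When one of the three values is on the forbidden list systeemi[2] but the threshold lies in
-- (-10, -10 + list1-counts of the values after the last hit], A returns True because counts added
-- after its -10 overwrite resurrect the counter, while B returns False: a forbidden hit is meant to disqualify.
def D_tro_ok (yhd : List Int) (systeemi : List (List Int)) : Prop :=
  let m := systeemi[0]!.getD 0 0
  let t := (yhd.take 3).reverse.takeWhile (!systeemi[2]!.contains ·)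
  t.length < 3 ∧ -10 < m ∧ m + 10 ≤ (t.map systeemi[1]!.count).sum
instance (yhd : List Int) (systeemi : List (List Int)) : Decidable (D_tro_ok yhd systeemi) := by
  unfold D_tro_ok; infer_instance

def Spec_tro_ok (yhd : List Int) (systeemi : List (List Int)) (out : Bool) : Prop := ¬ D_tro_ok yhd systeemi → out = tro_ok_alt yhd systeemi
instance (yhd : List Int) (systeemi : List (List Int)) (out : Bool) : Decidable (Spec_tro_ok yhd systeemi out) := by unfold Spec_tro_ok; infer_instance

def pvDiffWitness_tro_ok : List Int × List (List Int) := ([1, 2, 3], [[-9], [3], [1]])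
def pvDiffWitnessOut_tro_ok : Bool × Bool := (true, false)

-- ===== CLAIM (what is proved, stated in full; the proofs are below) =====
def Claim_unchanged_tro_ok : Prop := ∀ (yhd : List Int) (systeemi : List (List Int)), Dom_tro_ok yhd systeemi → Pre_tro_ok yhd systeemi → Spec_tro_ok yhd systeemi (tro_ok yhd systeemi)
def Claim_changed_tro_ok : Prop := Dom_tro_ok (pvDiffWitness_tro_ok.1) (pvDiffWitness_tro_ok.2) ∧ Pre_tro_ok (pvDiffWitness_tro_ok.1) (pvDiffWitness_tro_ok.2) ∧ D_tro_ok (pvDiffWitness_tro_ok.1) (pvDiffWitness_tro_ok.2) ∧ tro_ok (pvDiffWitness_tro_ok.1) (pvDiffWitness_tro_ok.2) = pvDiffWitnessOut_tro_ok.1 ∧ tro_ok_alt (pvDiffWitness_tro_ok.1) (pvDiffWitness_tro_ok.2) = pvDiffWitnessOut_tro_ok.2 ∧ pvDiffWitnessOut_tro_ok.1 ≠ pvDiffWitnessOut_tro_ok.2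
def Claim_exact_tro_ok : Prop := ∀ (yhd : List Int) (systeemi : List (List Int)), Dom_tro_ok yhd systeemi → Pre_tro_ok yhd systeemi → D_tro_ok yhd systeemi → tro_ok yhd systeemi ≠ tro_ok_alt yhd systeemi

-- ===== LEMMAS AND PROOFS =====
def pvAfterHits (b c : Int) (s1 s2 : List Int) : Int :=
  if c ∈ s2 then 0
  else if b ∈ s2 then (s1.count c : Int)
  else (s1.count b : Int) + (s1.count c : Int)

theorem D_iff (a b c m : Int) (s0r s1 s2 : List Int) (yr : List Int) (sr : List (List Int)) :
    D_tro_ok (a :: b :: c :: yr) ((m :: s0r) :: s1 :: s2 :: sr)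
      ↔ ((a ∈ s2 ∨ b ∈ s2 ∨ c ∈ s2) ∧ -10 < m ∧ m ≤ -10 + pvAfterHits b c s1 s2) := by
  by_cases hc : c ∈ s2 <;> by_cases hb : b ∈ s2 <;> by_cases ha : a ∈ s2 <;>
    simp [D_tro_ok, pvAfterHits, ha, hb, hc] <;>
    omega

theorem countLoop (s : List Int) (x acc : Int) :
    s.foldl (fun a y => if x == y then a + 1 else a) acc = acc + (s.count x : Int) := by
  induction s generalizing acc with
  | nil => simp
  | cons h t ih =>
      simp only [List.foldl_cons, ih, List.count_cons]
      by_cases hx : x = h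
      · simp [hx]; omega
      · have h2 : ¬ (h = x) := fun e => hx e.symm
        simp [hx, h2]

theorem resetLoop (s : List Int) (x acc : Int) :
    s.foldl (fun a y => if x == y then (-10 : Int) else a) acc = if x ∈ s then -10 else acc := by
  induction s generalizing acc with
  | nil => simp
  | cons h t ih =>
      simp only [List.foldl_cons, ih, List.mem_cons]
      by_cases hx : x = h <;> by_cases ht : x ∈ t <;> simp [hx, ht]

-- A's counter, reduced: -10 + pvAfterHits after a hit, else the total of the three list1 counts.
theorem tro_ok_core (a b c m : Int) (s0r s1 s2 : List Int) (yr : List Int) (sr : List (List Int)) :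
    tro_ok (a :: b :: c :: yr) ((m :: s0r) :: s1 :: s2 :: sr)
      = decide ((if a ∈ s2 ∨ b ∈ s2 ∨ c ∈ s2
                 then -10 + pvAfterHits b c s1 s2
                 else (s1.count a : Int) + s1.count b + s1.count c) ≥ m) := by
  unfold tro_ok
  simp only [show PySem.List.pyRange 0 3 1 = [0, 1, 2] by decide, List.foldl_cons, List.foldl_nil]
  simp only [PySem.List.pyGetD_ofNat', List.getD_cons_succ, List.getD_cons_zero]
  rw [PySem.List.foldl_pyRange_zero_pyGetD' s1 0 (fun v y => if a == y then v + 1 else v),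
      PySem.List.foldl_pyRange_zero_pyGetD' s2 0 (fun v y => if a == y then (-10 : Int) else v),
      PySem.List.foldl_pyRange_zero_pyGetD' s1 0 (fun v y => if b == y then v + 1 else v),
      PySem.List.foldl_pyRange_zero_pyGetD' s2 0 (fun v y => if b == y then (-10 : Int) else v),
      PySem.List.foldl_pyRange_zero_pyGetD' s1 0 (fun v y => if c == y then v + 1 else v),
      PySem.List.foldl_pyRange_zero_pyGetD' s2 0 (fun v y => if c == y then (-10 : Int) else v)]
  rw [resetLoop, countLoop, resetLoop, countLoop, resetLoop, countLoop]
  unfold pvAfterHits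
  by_cases hc : c ∈ s2 <;> by_cases hb : b ∈ s2 <;> by_cases ha : a ∈ s2 <;>
    simp only [ha, hb, hc, if_true, if_false, or_true, or_false,
      or_self] <;> rw [decide_eq_decide] <;> omega

-- B's counter, reduced to the same shape.
theorem tro_ok_alt_core (a b c m : Int) (s0r s1 s2 : List Int) (yr : List Int) (sr : List (List Int)) :
    tro_ok_alt (a :: b :: c :: yr) ((m :: s0r) :: s1 :: s2 :: sr)
      = decide ((if a ∈ s2 ∨ b ∈ s2 ∨ c ∈ s2
                 then (-10 : Int)
                 else (s1.count a : Int) + s1.count b + s1.count c) ≥ m) := by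
  unfold tro_ok_alt
  have hsl : PySem.List.slice (a :: b :: c :: yr) none (some 3) = [a, b, c] := by
    rw [show (3 : Int) = ((3 : Nat) : Int) by norm_num, PySem.List.slice_to_natCast]
    simp [List.take]
  simp only [hsl, PySem.List.pyGetD_ofNat', List.getD_cons_succ, List.getD_cons_zero,
    PySem.List.count_eq, List.any_cons, List.any_nil, List.map_cons, List.map_nil,
    List.sum_cons, List.sum_nil]
  by_cases ha : a ∈ s2 <;> by_cases hb : b ∈ s2 <;> by_cases hc : c ∈ s2 <;>
    simp [ha, hb, hc, decide_eq_decide] <;> omega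

theorem tro_ok_spec : Claim_unchanged_tro_ok := by
  intro yhd systeemi _ hpre hnd
  obtain ⟨hy, hs, h0⟩ := hpre
  rcases yhd with _|⟨a,_|⟨b,_|⟨c,yr⟩⟩⟩ <;> try simp at hy
  rcases systeemi with _|⟨s0,_|⟨s1,_|⟨s2,sr⟩⟩⟩ <;> try simp at hs
  rcases s0 with _|⟨m,s0r⟩
  · simp at h0
  rw [D_iff] at hnd
  rw [tro_ok_core, tro_ok_alt_core]
  by_cases hmem : a ∈ s2 ∨ b ∈ s2 ∨ c ∈ s2
  · simp only [hmem, if_true]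
    have hS : 0 ≤ pvAfterHits b c s1 s2 := by
      unfold pvAfterHits; split_ifs <;> positivity
    rw [decide_eq_decide]
    constructor <;> intro h
    · by_contra hlt
      exact hnd ⟨hmem, by omega, by omega⟩
    · omega
  · simp only [hmem, if_false]

theorem tro_ok_changed : Claim_changed_tro_ok := by unfold Claim_changed_tro_ok; decide

theorem tro_ok_tight : Claim_exact_tro_ok := by
  intro yhd systeemi _ hpre hd
  obtain ⟨hy, hs, h0⟩ := hpre
  rcases yhd with _|⟨a,_|⟨b,_|⟨c,yr⟩⟩⟩ <;> try simp at hy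
  rcases systeemi with _|⟨s0,_|⟨s1,_|⟨s2,sr⟩⟩⟩ <;> try simp at hs
  rcases s0 with _|⟨m,s0r⟩
  · simp at h0
  rw [D_iff] at hd
  obtain ⟨hmem, h1, h2⟩ := hd
  rw [tro_ok_core, tro_ok_alt_core]
  simp only [hmem, if_true]
  intro h
  rw [decide_eq_decide] at h
  omega
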